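-- pv_equiv track=rewrite | github.com/alavret/ical_import_export | caldav_helper/y360_calendar.py | parse_event_properties
-- ===== SOURCE A (Python) =====
-- def _unfold_ical_lines(text: str) -> list[str]:
--     lines = text.splitlines()
--     unfolded: list[str] = []
--     for line in lines:
--         if line.startswith((" ", "\t")) and unfolded:
--             unfolded[-1] += line[1:]
--         else:
--             unfolded.append(line)
--     return unfolded
--
-- def parse_event_properties(vevent_text: str) -> dict[str, list[str]]:
--     props: dict[str, list[str]] = {}
--     for line in _unfold_ical_lines(vevent_text):
--         if ":" not in line:
--             continue
--         name, value = line.split(":", 1)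
--         name = name.split(";", 1)[0].upper()
--         props.setdefault(name, []).append(value.strip())
--     return props
-- ===== SOURCE B (Python) =====
-- def parse_event_properties(vevent_text: str) -> dict[str, list[str]]:
--     # Single fused pass: keep the current logical line; flush it into props
--     # whenever a new logical line starts, and once more at the end.
--     props: dict[str, list[str]] = {}
--
--     def flush(logical):
--         if logical is None or ":" not in logical:
--             return
--         name, value = logical.split(":", 1)
--         props.setdefault(name.split(";", 1)[0].upper(), []).append(value.strip())
--
--     current = None
--     for line in vevent_text.splitlines():
--         if line.startswith((" ", "\t")) and current is not None:
--             current += line[1:]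
--         else:
--             flush(current)
--             current = line
--     flush(current)
--     return props
-- ===== Notes on version B (the rewrite author's own statement) =====
-- stated objective: simpler
-- what changed: Replaces A's two passes (materialising the whole unfolded-lines list, then parsing it) with one fused pass over splitlines() that keeps only the current logical line and flushes it into props when the next logical line starts and once at the end.
import Mathlib
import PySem

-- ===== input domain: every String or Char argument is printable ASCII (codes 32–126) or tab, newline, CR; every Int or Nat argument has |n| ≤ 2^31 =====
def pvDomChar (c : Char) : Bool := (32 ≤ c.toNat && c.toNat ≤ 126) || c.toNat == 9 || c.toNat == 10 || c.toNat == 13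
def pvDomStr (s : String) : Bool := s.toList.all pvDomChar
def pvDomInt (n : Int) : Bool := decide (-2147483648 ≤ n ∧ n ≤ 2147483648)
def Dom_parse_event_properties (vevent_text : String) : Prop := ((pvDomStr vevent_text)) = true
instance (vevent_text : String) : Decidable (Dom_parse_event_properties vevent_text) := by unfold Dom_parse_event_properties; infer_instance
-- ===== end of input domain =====

-- B fuses A's two passes (build the full unfolded-line list, then parse it) into one
-- pass over splitlines that keeps only the current logical line and flushes it into
-- the dict when the next logical line starts (objective: simpler).


-- ===== PORT A =====
-- _unfold_ical_lines: fold over the lines, appending, or extending the last unfolded line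
def unfold_ical_lines (text : String) : List String :=
  (PySem.Str.splitlines text).foldl
    (fun unfolded line =>
      if ((PySem.Str.startswith line " " || PySem.Str.startswith line "\t") && !unfolded.isEmpty) then
        unfolded.dropLast ++ [(unfolded.getLast?.getD "") ++ PySem.Str.slice line (some 1) none]
      else
        unfolded ++ [line])
    []

def parse_event_properties (vevent_text : String) : List (String × List String) :=
  ((unfold_ical_lines vevent_text).foldl
    (fun (props : PySem.Dict String (List String)) line =>
      if PySem.Str.isIn ":" line then
        -- name, value = line.split(":", 1): ":" ∈ line gives exactly two parts
        let parts := (PySem.Str.splitMax? line ":" 1).getD []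
        let name := parts.headD ""
        let value := parts.getD 1 ""
        props.modify
          (PySem.Str.upper (((PySem.Str.splitMax? name ";" 1).getD []).headD ""))
          [] (· ++ [PySem.Str.strip value])
      else props)
    PySem.Dict.empty).items

-- ===== PORT B =====
-- flush(logical): parse the completed logical line into props (no-op for None / no ':')
def flushProp (props : PySem.Dict String (List String)) (logical : Option String) :
    PySem.Dict String (List String) :=
  match logical with
  | none => props
  | some logical =>
      if PySem.Str.isIn ":" logical then
        -- name, value = logical.split(":", 1): ":" ∈ logical gives exactly two parts
        let parts := (PySem.Str.splitMax? logical ":" 1).getD []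
        let name := parts.headD ""
        let value := parts.getD 1 ""
        props.modify
          (PySem.Str.upper (((PySem.Str.splitMax? name ";" 1).getD []).headD ""))
          [] (· ++ [PySem.Str.strip value])
      else props

def parse_event_properties_alt (vevent_text : String) : List (String × List String) :=
  let st :=
    (PySem.Str.splitlines vevent_text).foldl
      (fun (st : Option String × PySem.Dict String (List String)) line =>
        if ((PySem.Str.startswith line " " || PySem.Str.startswith line "\t") && st.1.isSome) then
          (some ((st.1.getD "") ++ PySem.Str.slice line (some 1) none), st.2)
        else
          (some line, flushProp st.2 st.1))
      (none, PySem.Dict.empty)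
  (flushProp st.2 st.1).items

-- ===== PRECONDITION & SPEC =====
def Spec_parse_event_properties (vevent_text : String) (out : List (String × List String)) : Prop := out = parse_event_properties_alt vevent_text
instance (vevent_text : String) (out : List (String × List String)) : Decidable (Spec_parse_event_properties vevent_text out) := by unfold Spec_parse_event_properties; infer_instance

-- ===== CLAIM (what is proved, stated in full; the proofs are below) =====
def Claim_equal_parse_event_properties : Prop := ∀ (vevent_text : String), Dom_parse_event_properties vevent_text → Spec_parse_event_properties vevent_text (parse_event_properties vevent_text)

-- ===== LEMMAS AND PROOFS =====

-- proof-side names for the two loop bodies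
def uStep (unfolded : List String) (line : String) : List String :=
  if ((PySem.Str.startswith line " " || PySem.Str.startswith line "\t") && !unfolded.isEmpty) then
    unfolded.dropLast ++ [(unfolded.getLast?.getD "") ++ PySem.Str.slice line (some 1) none]
  else
    unfolded ++ [line]

def bStep (st : Option String × PySem.Dict String (List String)) (line : String) :
    Option String × PySem.Dict String (List String) :=
  if ((PySem.Str.startswith line " " || PySem.Str.startswith line "\t") && st.1.isSome) then
    (some ((st.1.getD "") ++ PySem.Str.slice line (some 1) none), st.2)
  else
    (some line, flushProp st.2 st.1)

lemma uStep_neg (acc : List String) (l : String)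
    (h : (PySem.Str.startswith l " " || PySem.Str.startswith l "\t") = false) :
    uStep acc l = acc ++ [l] := by
  unfold uStep; rw [h]; simp

lemma uStep_pos_concat (acc : List String) (c l : String)
    (h : (PySem.Str.startswith l " " || PySem.Str.startswith l "\t") = true) :
    uStep (acc ++ [c]) l = acc ++ [c ++ PySem.Str.slice l (some 1) none] := by
  unfold uStep; rw [h]; simp

lemma uStep_nil (l : String) : uStep [] l = [l] := by
  simp [uStep]

lemma bStep_pos (c : String) (d : PySem.Dict String (List String)) (l : String)
    (h : (PySem.Str.startswith l " " || PySem.Str.startswith l "\t") = true) :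
    bStep (some c, d) l = (some (c ++ PySem.Str.slice l (some 1) none), d) := by
  unfold bStep; rw [h]; simp

lemma bStep_neg (st : Option String × PySem.Dict String (List String)) (l : String)
    (h : (PySem.Str.startswith l " " || PySem.Str.startswith l "\t") = false) :
    bStep st l = (some l, flushProp st.2 st.1) := by
  unfold bStep; rw [h]; simp

lemma bStep_none (d : PySem.Dict String (List String)) (l : String) :
    bStep (none, d) l = (some l, d) := by
  simp [bStep, flushProp]

lemma unfold_prefix (ls : List String) :
    ∀ (acc : List String) (c : String),
      List.foldl uStep (acc ++ [c]) ls = acc ++ List.foldl uStep [c] ls := by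
  induction ls with
  | nil => intro acc c; rfl
  | cons l ls ih =>
      intro acc c
      by_cases h : (PySem.Str.startswith l " " || PySem.Str.startswith l "\t") = true
      · rw [List.foldl_cons, List.foldl_cons, uStep_pos_concat acc c l h,
            show ([c] : List String) = [] ++ [c] from rfl, uStep_pos_concat [] c l h,
            List.nil_append, ih acc (c ++ PySem.Str.slice l (some 1) none)]
      · rw [Bool.not_eq_true] at h
        rw [List.foldl_cons, List.foldl_cons, uStep_neg _ l h, uStep_neg [c] l h,
            show acc ++ [c] ++ [l] = (acc ++ [c]) ++ [l] from rfl, ih (acc ++ [c]) l,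
            show ([c] : List String) ++ [l] = [c] ++ [l] from rfl, ih [c] l,
            List.append_assoc]

lemma fused_main (ls : List String) :
    ∀ (c : String) (d : PySem.Dict String (List String)),
      (fun st => flushProp st.2 st.1) (List.foldl bStep (some c, d) ls)
        = List.foldl (fun d l => flushProp d (some l)) d (List.foldl uStep [c] ls) := by
  induction ls with
  | nil => intro c d; rfl
  | cons l ls ih =>
      intro c d
      by_cases h : (PySem.Str.startswith l " " || PySem.Str.startswith l "\t") = true
      · rw [List.foldl_cons, List.foldl_cons, bStep_pos c d l h,
            show ([c] : List String) = [] ++ [c] from rfl, uStep_pos_concat [] c l h,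
            List.nil_append]
        exact ih (c ++ PySem.Str.slice l (some 1) none) d
      · rw [Bool.not_eq_true] at h
        rw [List.foldl_cons, List.foldl_cons, bStep_neg (some c, d) l h, uStep_neg [c] l h,
            ih l (flushProp d (some c)),
            show ([c] : List String) ++ [l] = [c] ++ [l] from rfl, unfold_prefix ls [c] l,
            List.foldl_append]
        rfl

-- ===== VERDICT (by name: the statement is the Claim_ definition above) =====
theorem parse_event_properties_spec : Claim_equal_parse_event_properties := by
  intro v _
  show parse_event_properties v = parse_event_properties_alt v
  have hA : parse_event_properties v
      = (List.foldl (fun d l => flushProp d (some l)) PySem.Dict.empty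
          (List.foldl uStep [] (PySem.Str.splitlines v))).items := rfl
  have hB : parse_event_properties_alt v
      = ((fun st => flushProp st.2 st.1)
          (List.foldl bStep (none, PySem.Dict.empty) (PySem.Str.splitlines v))).items := rfl
  rw [hA, hB]
  cases PySem.Str.splitlines v with
  | nil => rfl
  | cons l ls =>
      rw [List.foldl_cons, List.foldl_cons, uStep_nil l, bStep_none PySem.Dict.empty l,
          ← fused_main ls l PySem.Dict.empty]
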